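-- pv_equiv track=rewrite | github.com/xaar1982/codesignal | areEquallyStrong.py | areEquallyStrong
-- ===== SOURCE A (Python) =====
-- def areEquallyStrong(yourLeft, yourRight, friendsLeft, friendsRight):
--     sum_my_weights = yourLeft + yourRight
--     sum_friends_weights = friendsLeft + friendsRight
--     count = 0
--     all_arms = [yourLeft, yourRight, friendsLeft, friendsRight]
--     heaviest_arm = max(all_arms)
--     for i in range(len(all_arms)):
--         if all_arms[i] == heaviest_arm:
--             count+=1
--         else:
--             continue
--
--     if (count == 1):
--         return False
--
--     elif (sum_my_weights == sum_friends_weights):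
--
--         return True
--     else:
--         return False
-- ===== SOURCE B (Python) =====
-- def areEquallyStrong(yourLeft, yourRight, friendsLeft, friendsRight):
--     arms = sorted([yourLeft, yourRight, friendsLeft, friendsRight])
--     if arms[3] > arms[2]:
--         return False
--     return yourLeft + yourRight == friendsLeft + friendsRight
-- ===== Notes on version B (the rewrite author's own statement) =====
-- stated objective: simpler
-- what changed: Replaces the max-then-counting loop with sorting the four arms and comparing the top two sorted elements to detect a unique maximum, then comparing the sums directly.
import Mathlib
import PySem

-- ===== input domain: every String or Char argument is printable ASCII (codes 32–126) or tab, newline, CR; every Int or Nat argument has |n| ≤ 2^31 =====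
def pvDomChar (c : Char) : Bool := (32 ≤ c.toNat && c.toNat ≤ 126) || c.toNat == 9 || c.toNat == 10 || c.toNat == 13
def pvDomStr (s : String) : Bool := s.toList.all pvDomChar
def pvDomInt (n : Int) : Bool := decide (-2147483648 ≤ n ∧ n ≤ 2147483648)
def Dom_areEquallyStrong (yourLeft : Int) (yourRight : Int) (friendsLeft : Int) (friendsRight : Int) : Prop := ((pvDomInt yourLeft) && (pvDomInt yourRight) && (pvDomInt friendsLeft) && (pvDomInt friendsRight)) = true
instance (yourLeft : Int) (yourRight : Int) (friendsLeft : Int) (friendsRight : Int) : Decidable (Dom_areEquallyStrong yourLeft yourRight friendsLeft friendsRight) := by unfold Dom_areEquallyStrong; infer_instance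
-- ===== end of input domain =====

-- B replaces A's max-then-counting loop by sorting the four arms and comparing the top two sorted elements (simpler).


-- ===== PORT A =====
def areEquallyStrong (yourLeft : Int) (yourRight : Int) (friendsLeft : Int) (friendsRight : Int) : Bool :=
  let sum_my_weights := yourLeft + yourRight
  let sum_friends_weights := friendsLeft + friendsRight
  let all_arms : List Int := [yourLeft, yourRight, friendsLeft, friendsRight]
  let heaviest_arm := (PySem.List.max? all_arms (fun x => x)).getD 0   -- max(all_arms); the list is nonempty so getD never fires
  let count := (PySem.List.pyRange 0 (Int.ofNat all_arms.length) 1).foldl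
    (fun c i => if PySem.List.pyGetD all_arms i 0 = heaviest_arm then c + 1 else c) (0 : Int)
  if count = 1 then false
  else if sum_my_weights = sum_friends_weights then true
  else false

-- ===== PORT B =====
def areEquallyStrong_alt (yourLeft : Int) (yourRight : Int) (friendsLeft : Int) (friendsRight : Int) : Bool :=
  let arms := PySem.List.sorted [yourLeft, yourRight, friendsLeft, friendsRight] (fun x => x) false
  if PySem.List.pyGetD arms 3 0 > PySem.List.pyGetD arms 2 0 then false
  else decide (yourLeft + yourRight = friendsLeft + friendsRight)

-- ===== PRECONDITION & SPEC =====
def Spec_areEquallyStrong (yourLeft : Int) (yourRight : Int) (friendsLeft : Int) (friendsRight : Int) (out : Bool) : Prop := out = areEquallyStrong_alt yourLeft yourRight friendsLeft friendsRight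
instance (yourLeft : Int) (yourRight : Int) (friendsLeft : Int) (friendsRight : Int) (out : Bool) : Decidable (Spec_areEquallyStrong yourLeft yourRight friendsLeft friendsRight out) := by unfold Spec_areEquallyStrong; infer_instance

-- ===== CLAIM (what is proved, stated in full; the proofs are below) =====
def Claim_equal_areEquallyStrong : Prop := ∀ (yourLeft : Int) (yourRight : Int) (friendsLeft : Int) (friendsRight : Int), Dom_areEquallyStrong yourLeft yourRight friendsLeft friendsRight → Spec_areEquallyStrong yourLeft yourRight friendsLeft friendsRight (areEquallyStrong yourLeft yourRight friendsLeft friendsRight)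

-- ===== LEMMAS AND PROOFS =====

-- Both ports return `false` exactly when the maximum arm is unique; otherwise they compare the sums.
-- The common characterisation: "some arm is strictly greater than the other three".

set_option maxHeartbeats 1000000 in
lemma areEquallyStrong_char (a b c d : Int) :
    areEquallyStrong a b c d =
      (if (b<a ∧ c<a ∧ d<a) ∨ (a<b ∧ c<b ∧ d<b) ∨ (a<c ∧ b<c ∧ d<c) ∨ (a<d ∧ b<d ∧ c<d)
       then false else decide (a+b=c+d)) := by
  have hl : (([a,b,c,d] : List Int).length) = 4 := rfl
  have hr : PySem.List.pyRange 0 (Int.ofNat 4) 1 = [0,1,2,3] := by decide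
  simp only [areEquallyStrong, hl, hr]
  simp only [List.foldl, PySem.List.max?_id_cons, Option.getD]
  have g0 : PySem.List.pyGetD ([a,b,c,d] : List Int) 0 0 = a := rfl
  have g1 : PySem.List.pyGetD ([a,b,c,d] : List Int) 1 0 = b := rfl
  have g2 : PySem.List.pyGetD ([a,b,c,d] : List Int) 2 0 = c := rfl
  have g3 : PySem.List.pyGetD ([a,b,c,d] : List Int) 3 0 = d := rfl
  rw [g0, g1, g2, g3]
  clear g0 g1 g2 g3 hl hr
  simp only [max_def]
  split_ifs <;>
    first
      | rfl
      | (exfalso; omega)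
      | (exact (decide_eq_true (by omega)).symm)
      | (exact (decide_eq_false (by omega)).symm)

set_option maxHeartbeats 2000000 in
lemma areEquallyStrong_alt_char (a b c d : Int) :
    areEquallyStrong_alt a b c d =
      (if (b<a ∧ c<a ∧ d<a) ∨ (a<b ∧ c<b ∧ d<b) ∨ (a<c ∧ b<c ∧ d<c) ∨ (a<d ∧ b<d ∧ c<d)
       then false else decide (a+b=c+d)) := by
  simp only [areEquallyStrong_alt, PySem.List.sorted_eq_foldl_insertBy, List.foldl,
    PySem.List.insertBy]
  split_ifs <;>
    (try simp only [PySem.List.insertBy, decide_eq_true_eq, not_lt] at *) <;>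
    (try split_ifs at *) <;>
    (try simp only [PySem.List.insertBy, PySem.List.pyGetD, PySem.List.pyGet?, PySem.List.pyIdx?,
      decide_eq_true_eq, not_lt] at *) <;>
    (try split_ifs at *) <;>
    (try simp at *) <;>
    omega

-- ===== VERDICT (by name: the statement is the Claim_ definition above) =====
theorem areEquallyStrong_spec : Claim_equal_areEquallyStrong := by
  intro yl yr fl fr _
  unfold Spec_areEquallyStrong
  rw [areEquallyStrong_char, areEquallyStrong_alt_char]
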